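-- pv_equiv track=rewrite | github.com/emms204/ScriptGen | src/TextGen/dramatron/DramaTronCore.py | parse_narrative_elements
-- ===== SOURCE A (Python) =====
-- def parse_narrative_elements(output):
--     places = []
--     plot_elements = []
--     beats = []
--
--     sections = output.strip().split("\n\n")
--
--     for section in sections:
--         lines = section.split('\n')
--         for line in lines:
--             if line.startswith("Place:"):
--                 place = line.split("Place:")[1].strip()
--                 places.append(place)
--             elif line.startswith("Plot element:"):
--                 plot_element = line.split("Plot element:")[1].strip()
--                 plot_elements.append(plot_element)
--             elif line.startswith("Beat:"):
--                 beat = line.split("Beat:")[1].strip()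
--                 beats.append(beat)
--
--     return places, plot_elements, beats
-- ===== SOURCE B (Python) =====
-- def parse_narrative_elements(output):
--     lines = [line for section in output.strip().split("\n\n")
--              for line in section.split("\n")]
--
--     def pick(token):
--         return [line.split(token)[1].strip()
--                 for line in lines if line.startswith(token)]
--
--     return pick("Place:"), pick("Plot element:"), pick("Beat:")
-- ===== Notes on version B (the rewrite author's own statement) =====
-- stated objective: simpler
-- what changed: A's single fused pass with an if/elif chain and three accumulators is replaced by flattening the section lines once and building each of the three result lists with its own independent filter-and-map comprehension over the flattened lines.
import Mathlib
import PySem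

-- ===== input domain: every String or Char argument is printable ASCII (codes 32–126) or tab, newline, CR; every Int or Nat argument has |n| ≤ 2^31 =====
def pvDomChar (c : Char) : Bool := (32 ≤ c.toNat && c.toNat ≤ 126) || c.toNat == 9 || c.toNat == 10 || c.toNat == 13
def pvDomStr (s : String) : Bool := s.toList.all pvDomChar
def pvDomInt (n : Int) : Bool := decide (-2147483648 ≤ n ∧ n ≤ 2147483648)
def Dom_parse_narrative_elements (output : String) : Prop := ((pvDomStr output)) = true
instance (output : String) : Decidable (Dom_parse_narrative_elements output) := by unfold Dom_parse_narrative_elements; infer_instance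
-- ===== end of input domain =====

-- B replaces A's fused if/elif accumulator pass by one flattening of the lines plus three
-- independent filter-and-map passes (objective: simpler decomposition; same asymptotic cost).

-- ===== PORT A =====
-- one line of A's inner loop body; `line.split(token)[1]` is ported as `.getD 1 ""`:
-- under the startswith guard the split always has at least two parts, so Python never raises here.
def pvAStep (acc : List String × List String × List String) (line : String) :
    List String × List String × List String :=
  if PySem.Str.startswith line "Place:" then
    (acc.1 ++ [PySem.Str.strip (((PySem.Str.split? line "Place:").getD []).getD 1 "")], acc.2.1, acc.2.2)
  else if PySem.Str.startswith line "Plot element:" then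
    (acc.1, acc.2.1 ++ [PySem.Str.strip (((PySem.Str.split? line "Plot element:").getD []).getD 1 "")], acc.2.2)
  else if PySem.Str.startswith line "Beat:" then
    (acc.1, acc.2.1, acc.2.2 ++ [PySem.Str.strip (((PySem.Str.split? line "Beat:").getD []).getD 1 "")])
  else acc

def parse_narrative_elements (output : String) : List String × List String × List String :=
  let sections := (PySem.Str.split? (PySem.Str.strip output) "\n\n").getD []
  sections.foldl
    (fun acc sec => ((PySem.Str.split? sec "\n").getD []).foldl pvAStep acc)
    ([], [], [])

-- ===== PORT B =====
-- Source B's `pick(token)` comprehension; `.getD 1 ""` as above (guarded by the filter).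
def pvPick (lines : List String) (token : String) : List String :=
  (lines.filter (fun line => PySem.Str.startswith line token)).map
    (fun line => PySem.Str.strip (((PySem.Str.split? line token).getD []).getD 1 ""))

def parse_narrative_elements_alt (output : String) : List String × List String × List String :=
  let lines := ((PySem.Str.split? (PySem.Str.strip output) "\n\n").getD []).flatMap
    (fun sec => (PySem.Str.split? sec "\n").getD [])
  (pvPick lines "Place:", pvPick lines "Plot element:", pvPick lines "Beat:")

-- ===== PRECONDITION & SPEC =====
def Spec_parse_narrative_elements (output : String) (out : List String × List String × List String) : Prop := out = parse_narrative_elements_alt output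
instance (output : String) (out : List String × List String × List String) : Decidable (Spec_parse_narrative_elements output out) := by unfold Spec_parse_narrative_elements; infer_instance

-- ===== CLAIM (what is proved, stated in full; the proofs are below) =====
def Claim_equal_parse_narrative_elements : Prop := ∀ (output : String), Dom_parse_narrative_elements output → Spec_parse_narrative_elements output (parse_narrative_elements output)

-- ===== LEMMAS AND PROOFS =====

-- no string starts with two of the three markers: they differ at the first or third character
lemma pv_pre3 (c0 c1 c2 : Char) (p cs : List Char) (h : (c0 :: c1 :: c2 :: p) <+: cs) :
    cs.take 3 = [c0, c1, c2] := by
  obtain ⟨t, rfl⟩ := h; simp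

lemma pv_place_not_plot (line : String) (h : PySem.Str.startswith line "Place:" = true) :
    PySem.Str.startswith line "Plot element:" = false := by
  simp only [PySem.Str.startswith_eq, PySem.Chars.startswith_iff] at h ⊢
  rw [Bool.eq_false_iff]
  intro h2
  rw [PySem.Chars.startswith_iff] at h2
  have t1 := pv_pre3 'P' 'l' 'a' "ce:".toList line.toList h
  have t2 := pv_pre3 'P' 'l' 'o' "t element:".toList line.toList h2
  rw [t1] at t2
  simp at t2

lemma pv_place_not_beat (line : String) (h : PySem.Str.startswith line "Place:" = true) :
    PySem.Str.startswith line "Beat:" = false := by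
  simp only [PySem.Str.startswith_eq, PySem.Chars.startswith_iff] at h ⊢
  rw [Bool.eq_false_iff]
  intro h2
  rw [PySem.Chars.startswith_iff] at h2
  have t1 := pv_pre3 'P' 'l' 'a' "ce:".toList line.toList h
  have t2 := pv_pre3 'B' 'e' 'a' "t:".toList line.toList h2
  rw [t1] at t2
  simp at t2

lemma pv_plot_not_beat (line : String) (h : PySem.Str.startswith line "Plot element:" = true) :
    PySem.Str.startswith line "Beat:" = false := by
  simp only [PySem.Str.startswith_eq, PySem.Chars.startswith_iff] at h ⊢
  rw [Bool.eq_false_iff]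
  intro h2
  rw [PySem.Chars.startswith_iff] at h2
  have t1 := pv_pre3 'P' 'l' 'o' "t element:".toList line.toList h
  have t2 := pv_pre3 'B' 'e' 'a' "t:".toList line.toList h2
  rw [t1] at t2
  simp at t2

-- one application of A's loop body, by case
lemma pvAStep_place (line : String) (p q r : List String)
    (h : PySem.Str.startswith line "Place:" = true) :
    pvAStep (p, q, r) line =
      (p ++ [PySem.Str.strip (((PySem.Str.split? line "Place:").getD []).getD 1 "")], q, r) := by
  simp only [pvAStep, h, if_true]

lemma pvAStep_plot (line : String) (p q r : List String)
    (h1 : PySem.Str.startswith line "Place:" = false)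
    (h2 : PySem.Str.startswith line "Plot element:" = true) :
    pvAStep (p, q, r) line =
      (p, q ++ [PySem.Str.strip (((PySem.Str.split? line "Plot element:").getD []).getD 1 "")], r) := by
  simp only [pvAStep, h1, h2, if_true, Bool.false_eq_true, if_false]

lemma pvAStep_beat (line : String) (p q r : List String)
    (h1 : PySem.Str.startswith line "Place:" = false)
    (h2 : PySem.Str.startswith line "Plot element:" = false)
    (h3 : PySem.Str.startswith line "Beat:" = true) :
    pvAStep (p, q, r) line =
      (p, q, r ++ [PySem.Str.strip (((PySem.Str.split? line "Beat:").getD []).getD 1 "")]) := by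
  simp only [pvAStep, h1, h2, h3, if_true, Bool.false_eq_true, if_false]

lemma pvAStep_none (line : String) (p q r : List String)
    (h1 : PySem.Str.startswith line "Place:" = false)
    (h2 : PySem.Str.startswith line "Plot element:" = false)
    (h3 : PySem.Str.startswith line "Beat:" = false) :
    pvAStep (p, q, r) line = (p, q, r) := by
  simp only [pvAStep, h1, h2, h3, Bool.false_eq_true, if_false]

-- one step of B's comprehension, by case
lemma pvPick_cons_pos (line : String) (rest : List String) (token : String)
    (h : PySem.Str.startswith line token = true) :
    pvPick (line :: rest) token =
      PySem.Str.strip (((PySem.Str.split? line token).getD []).getD 1 "") :: pvPick rest token := by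
  simp only [pvPick, List.filter_cons, h, if_true, List.map_cons]

lemma pvPick_cons_neg (line : String) (rest : List String) (token : String)
    (h : PySem.Str.startswith line token = false) :
    pvPick (line :: rest) token = pvPick rest token := by
  simp only [pvPick, List.filter_cons, h, Bool.false_eq_true, if_false]

-- A's fused fold over the lines equals B's three independent passes, appended to the accumulator
lemma pv_fold_eq (lines : List String) (p q r : List String) :
    lines.foldl pvAStep (p, q, r) =
      (p ++ pvPick lines "Place:", q ++ pvPick lines "Plot element:", r ++ pvPick lines "Beat:") := by
  induction lines generalizing p q r with
  | nil => simp [pvPick]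
  | cons line rest ih =>
    rw [List.foldl_cons]
    by_cases h1 : PySem.Str.startswith line "Place:" = true
    · have n2 := pv_place_not_plot line h1
      have n3 := pv_place_not_beat line h1
      rw [pvAStep_place line p q r h1, ih, pvPick_cons_pos line rest _ h1,
        pvPick_cons_neg line rest _ n2, pvPick_cons_neg line rest _ n3]
      simp
    · rw [Bool.not_eq_true] at h1
      by_cases h2 : PySem.Str.startswith line "Plot element:" = true
      · have n3 := pv_plot_not_beat line h2
        rw [pvAStep_plot line p q r h1 h2, ih, pvPick_cons_neg line rest _ h1,
          pvPick_cons_pos line rest _ h2, pvPick_cons_neg line rest _ n3]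
        simp
      · rw [Bool.not_eq_true] at h2
        by_cases h3 : PySem.Str.startswith line "Beat:" = true
        · rw [pvAStep_beat line p q r h1 h2 h3, ih, pvPick_cons_neg line rest _ h1,
            pvPick_cons_neg line rest _ h2, pvPick_cons_pos line rest _ h3]
          simp
        · rw [Bool.not_eq_true] at h3
          rw [pvAStep_none line p q r h1 h2 h3, ih, pvPick_cons_neg line rest _ h1,
            pvPick_cons_neg line rest _ h2, pvPick_cons_neg line rest _ h3]

-- A's nested loop over sections/lines equals one fold over the flattened lines
lemma pv_sections_fold (sections : List String) (acc : List String × List String × List String) :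
    sections.foldl (fun acc sec => ((PySem.Str.split? sec "\n").getD []).foldl pvAStep acc) acc =
      (sections.flatMap (fun s => (PySem.Str.split? s "\n").getD [])).foldl pvAStep acc := by
  induction sections generalizing acc with
  | nil => simp
  | cons s rest ih => simp [List.foldl_append, ih]

-- ===== VERDICT (by name: the statement is the Claim_ definition above) =====
theorem parse_narrative_elements_spec : Claim_equal_parse_narrative_elements := by
  intro output _
  unfold Spec_parse_narrative_elements parse_narrative_elements parse_narrative_elements_alt
  rw [pv_sections_fold, pv_fold_eq]
  simp
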